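-- pv_equiv track=rewrite | github.com/kangminchan99/coding_test_python | 프로그래머스/Lv2/기능 개발.py | solution
-- ===== SOURCE A (Python) =====
-- import math
--
-- def solution(progresses, speeds):
--     lenS = len(speeds)
--     answer = []
--     cnt = 1
--     for i in range(lenS):
--         answer.append(math.ceil((100 - progresses[i]) / speeds[i]))
--
--     checked = answer[0]
--     result = []
--     for i in answer[1:]:
--         if i > checked:
--             result.append(cnt)
--             checked = i
--             cnt = 1
--         else:
--             cnt += 1
--     result.append(cnt)
--
--     return result
-- ===== SOURCE B (Python) =====
-- import math
-- from collections import deque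
--
--
-- def solution(progresses, speeds):
--     days = deque(math.ceil((100 - p) / s) for p, s in zip(progresses, speeds))
--     result = []
--     while days:
--         leader = days.popleft()
--         size = 1
--         while days and days[0] <= leader:
--             days.popleft()
--             size += 1
--         result.append(size)
--     return result
-- ===== Notes on version B (the rewrite author's own statement) =====
-- stated objective: idiomatic
-- what changed: A makes one flat pass carrying a counter and a 'checked' group leader; B builds the days list once with zip and then drains it as a queue in a nested loop, popping each group leader and every following day <= it and appending group sizes.
import Mathlib
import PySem

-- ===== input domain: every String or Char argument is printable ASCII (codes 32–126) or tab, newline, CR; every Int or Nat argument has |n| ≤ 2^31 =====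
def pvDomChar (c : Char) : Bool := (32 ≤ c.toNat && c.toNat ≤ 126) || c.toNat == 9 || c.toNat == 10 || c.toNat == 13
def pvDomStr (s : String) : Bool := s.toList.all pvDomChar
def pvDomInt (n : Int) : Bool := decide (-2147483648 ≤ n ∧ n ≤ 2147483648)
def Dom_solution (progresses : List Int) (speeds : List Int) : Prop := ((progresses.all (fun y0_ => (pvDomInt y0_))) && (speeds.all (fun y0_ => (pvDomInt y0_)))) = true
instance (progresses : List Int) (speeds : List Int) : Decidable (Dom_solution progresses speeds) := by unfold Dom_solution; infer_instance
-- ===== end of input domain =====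

-- B is an idiomatic nested queue-draining rewrite of A's flat counter pass; equal return values proved on Pre_.

-- shared arithmetic helper: math.ceil((100 - p) / s) ported as exact ceiling division
-- -((-x) // s). Exact on Dom: |x| ≤ 2^31 + 100 and |s| ≤ 2^31, so the float quotient's
-- rounding error (≤ |x/s|·2⁻⁵³) is smaller than 1/|s|, the least distance from a
-- non-integer quotient to any integer, hence math.ceil of the float equals the exact ceil.
def ceilDivPy (x y : Int) : Int := -(PySem.Int.floordiv (-x) y)

-- ===== PORT A =====
def solution (progresses : List Int) (speeds : List Int) : List Int :=
  let lenS : Int := speeds.length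
  -- for i in range(lenS): answer.append(math.ceil((100 - progresses[i]) / speeds[i]))
  let answer : List Int := (PySem.List.pyRange 0 lenS 1).foldl
    (fun acc i => acc ++ [ceilDivPy (100 - PySem.List.pyGetD progresses i 0)
                                    (PySem.List.pyGetD speeds i 0)]) []
  let checked := PySem.List.pyGetD answer 0 0   -- answer[0] (IndexError excluded by Pre_)
  -- for i in answer[1:]: …
  let st := (PySem.List.slice answer (some 1) none).foldl
    (fun (st : Int × Int × List Int) i =>
      let checked := st.1
      let cnt := st.2.1
      let result := st.2.2
      if i > checked then (i, 1, result ++ [cnt]) else (checked, cnt + 1, result))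
    (checked, 1, [])
  st.2.2 ++ [st.2.1]   -- result.append(cnt); return result

-- ===== PORT B =====
-- inner 'while days and days[0] <= leader: popleft; size += 1' : returns (size, remaining days)
def takeGroup (leader : Int) : List Int → Int → Int × List Int
  | [], size => (size, [])
  | d :: ds, size => if d ≤ leader then takeGroup leader ds (size + 1) else (size, d :: ds)

theorem takeGroup_snd_length_le (leader : Int) (l : List Int) (size : Int) :
    (takeGroup leader l size).2.length ≤ l.length := by
  induction l generalizing size with
  | nil => simp [takeGroup]
  | cons d ds ih =>
    simp only [takeGroup]
    split
    · exact le_trans (ih _) (Nat.le_succ _)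
    · exact le_refl _

-- outer 'while days: leader = popleft; …; result.append(size)'
def drain : List Int → List Int
  | [] => []
  | d :: rest => (takeGroup d rest 1).1 :: drain (takeGroup d rest 1).2
termination_by l => l.length
decreasing_by
  exact Nat.lt_succ_of_le (takeGroup_snd_length_le d rest 1)

def solution_alt (progresses : List Int) (speeds : List Int) : List Int :=
  let days := (progresses.zip speeds).map (fun ps => ceilDivPy (100 - ps.1) ps.2)
  drain days

-- ===== PRECONDITION & SPEC =====
-- Pre_ excludes exactly where A raises: empty speeds / speeds longer than progresses
-- (IndexError) and a zero speed (ZeroDivisionError).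
def Pre_solution (progresses : List Int) (speeds : List Int) : Prop :=
  speeds ≠ [] ∧ speeds.length ≤ progresses.length ∧ ∀ s ∈ speeds, s ≠ 0
instance (progresses : List Int) (speeds : List Int) : Decidable (Pre_solution progresses speeds) := by
  unfold Pre_solution; infer_instance

def pvWitness_solution : List Int × List Int := ([93, 30, 55], [1, 30, 5])

def Spec_solution (progresses : List Int) (speeds : List Int) (out : List Int) : Prop := out = solution_alt progresses speeds
instance (progresses : List Int) (speeds : List Int) (out : List Int) : Decidable (Spec_solution progresses speeds out) := by unfold Spec_solution; infer_instance

-- ===== CLAIM (what is proved, stated in full; the proofs are below) =====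
def Claim_equal_solution : Prop := ∀ (progresses : List Int) (speeds : List Int), Dom_solution progresses speeds → Pre_solution progresses speeds → Spec_solution progresses speeds (solution progresses speeds)
-- ===== LEMMAS AND PROOFS =====

-- A's index-loop over range(len(speeds)) builds the same days list as B's zip/map.
theorem answer_eq_days (ps ss : List Int) (h : ss.length ≤ ps.length) :
    (PySem.List.pyRange 0 (ss.length : Int) 1).map
        (fun i => ceilDivPy (100 - PySem.List.pyGetD ps i 0) (PySem.List.pyGetD ss i 0))
      = (ps.zip ss).map (fun t => ceilDivPy (100 - t.1) t.2) := by
  apply List.ext_getElem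
  · simp [PySem.List.length_pyRange_one]
    omega
  · intro k h1 h2
    have hk : k < ss.length := by
      simpa [PySem.List.length_pyRange_one] using h1
    simp [PySem.List.getElem_pyRange_one, List.getElem_zip,
      List.getD_eq_getElem?_getD, List.getElem?_eq_getElem (by omega : k < ps.length),
      List.getElem?_eq_getElem hk]

-- A's carried-counter fold equals B's queue draining, for any leader/count/accumulated result.
theorem fold_eq_drain (l : List Int) (c n : Int) (res : List Int) :
    (l.foldl
        (fun (st : Int × Int × List Int) i =>
          if i > st.1 then (i, 1, st.2.2 ++ [st.2.1]) else (st.1, st.2.1 + 1, st.2.2))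
        (c, n, res)).2.2 ++
      [(l.foldl
        (fun (st : Int × Int × List Int) i =>
          if i > st.1 then (i, 1, st.2.2 ++ [st.2.1]) else (st.1, st.2.1 + 1, st.2.2))
        (c, n, res)).2.1]
      = res ++ ((takeGroup c l n).1 :: drain (takeGroup c l n).2) := by
  induction l generalizing c n res with
  | nil => simp [takeGroup, drain]
  | cons d ds ih =>
    by_cases h : d ≤ c
    · have h' : ¬ (c < d) := not_lt.mpr h
      simpa [List.foldl_cons, takeGroup, h, h'] using ih c (n + 1) res
    · have h' : c < d := lt_of_not_ge h
      have := ih d 1 (res ++ [n])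
      simp only [List.foldl_cons, if_pos h', takeGroup, if_neg h] at this ⊢
      rw [this, drain]
      simp

-- ===== VERDICT (by name: the statement is the Claim_ definition above) =====
theorem solution_spec : Claim_equal_solution := by
  intro ps ss _hdom hpre
  obtain ⟨hne, hlen, _hz⟩ := hpre
  unfold Spec_solution solution solution_alt
  simp only [PySem.List.foldl_append_singleton_eq_map]
  rw [answer_eq_days ps ss hlen]
  set days := (ps.zip ss).map (fun t => ceilDivPy (100 - t.1) t.2) with hdays
  have hdne : days ≠ [] := by
    apply List.ne_nil_of_length_pos
    have hsl : 0 < ss.length := List.length_pos_of_ne_nil hne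
    simp [hdays]
    omega
  obtain ⟨d0, rest, hcons⟩ := List.exists_cons_of_ne_nil hdne
  rw [hcons]
  simp only [List.nil_append, PySem.List.pyGetD_zero_cons, PySem.List.slice_from_one,
    List.tail_cons]
  rw [fold_eq_drain rest d0 1 []]
  rw [drain]
  simp
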